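-- pv_equiv track=rewrite | github.com/mius-it/y_lyceum_sem_02 | 20. Функции. Возвращение значений из функций/2014 Тень, знай свое место.py | make_shades
-- ===== SOURCE A (Python) =====
-- def make_shades(alley, k):
--     al_len = len(alley)
--     shades = [False] * al_len
--     for i in range(al_len - 1):
--         if alley[i]:
--             sh_len = (alley[i] * k + 1) if (i + alley[i] * k + 1) < al_len else (al_len - i)
--             for j in range(i, i + sh_len):
--                 shades[j] = True
--     return shades
-- ===== SOURCE B (Python) =====
-- def make_shades(alley, k):
--     n = len(alley)
--     out = []
--     reach = 0
--     for j, v in enumerate(alley):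
--         if j < n - 1 and v:
--             e = j + v * k + 1
--             if e > n:
--                 e = n
--             if e > reach:
--                 reach = e
--         out.append(j < reach)
--     return out
-- ===== Notes on version B (the rewrite author's own statement) =====
-- stated objective: faster
-- what changed: Replaced the per-tree inner marking loop (re-marking overlapping shadow cells) by a single left-to-right sweep that tracks the furthest shaded index reached so far and emits each cell's flag exactly once.
import Mathlib
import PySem

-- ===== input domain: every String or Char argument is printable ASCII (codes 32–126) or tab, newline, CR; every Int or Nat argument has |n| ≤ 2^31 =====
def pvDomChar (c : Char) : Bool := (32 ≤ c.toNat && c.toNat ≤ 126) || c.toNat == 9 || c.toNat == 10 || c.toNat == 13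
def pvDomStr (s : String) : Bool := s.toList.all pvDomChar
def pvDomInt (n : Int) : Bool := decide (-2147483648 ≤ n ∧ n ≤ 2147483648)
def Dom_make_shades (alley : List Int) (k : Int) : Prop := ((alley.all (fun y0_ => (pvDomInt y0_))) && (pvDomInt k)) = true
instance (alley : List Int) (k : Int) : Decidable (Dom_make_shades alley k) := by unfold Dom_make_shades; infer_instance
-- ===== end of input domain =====

-- B replaces A's per-tree re-marking of overlapping shadow intervals by one left-to-right
-- sweep tracking the furthest shaded index; objective: faster (single pass).

-- ===== PORT A =====
-- literal transliteration of A: the loop body 'if alley[i]: … mark shades[i..i+sh_len)'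
def stepA (alley : List Int) (k : Int) (shades : List Bool) (i : Int) : List Bool :=
  let al_len : Int := alley.length
  let v := PySem.List.pyGetD alley i 0
  if v ≠ 0 then
    let sh_len := if i + v * k + 1 < al_len then v * k + 1 else al_len - i
    (PySem.List.pyRange i (i + sh_len) 1).foldl
      (fun s j => PySem.List.pySetD s j true) shades
  else shades

-- shades = [False]*n; for i in range(n-1): stepA; return shades
def make_shades (alley : List Int) (k : Int) : List Bool :=
  (PySem.List.pyRange 0 ((alley.length : Int) - 1) 1).foldl
    (stepA alley k) (List.replicate alley.length false)

-- ===== PORT B =====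
-- literal transliteration of B's loop body: update reach, append j < reach
def stepB (n k : Int) (st : List Bool × Int) (p : Int × Int) : List Bool × Int :=
  let j := p.1
  let v := p.2
  let reach :=
    if j < n - 1 ∧ v ≠ 0 then
      let e := j + v * k + 1
      let e := if e > n then n else e
      if e > st.2 then e else st.2
    else st.2
  (st.1 ++ [decide (j < reach)], reach)

def make_shades_alt (alley : List Int) (k : Int) : List Bool :=
  let n : Int := alley.length
  ((PySem.List.enumerate alley 0).foldl (stepB n k) ([], 0)).1

-- ===== PRECONDITION & SPEC =====
def Spec_make_shades (alley : List Int) (k : Int) (out : List Bool) : Prop := out = make_shades_alt alley k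
instance (alley : List Int) (k : Int) (out : List Bool) : Decidable (Spec_make_shades alley k out) := by unfold Spec_make_shades; infer_instance

-- ===== CLAIM (what is proved, stated in full; the proofs are below) =====
def Claim_equal_make_shades : Prop := ∀ (alley : List Int) (k : Int), Dom_make_shades alley k → Spec_make_shades alley k (make_shades alley k)

-- ===== LEMMAS AND PROOFS =====

-- the position-j coverage predicate both programs compute
def covP (alley : List Int) (k : Int) (j : Nat) : Prop :=
  ∃ i : Nat, i ≤ j ∧ (i : Int) < (alley.length : Int) - 1 ∧
    PySem.List.pyGetD alley (i : Int) 0 ≠ 0 ∧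
    (j : Int) < (i : Int) + PySem.List.pyGetD alley (i : Int) 0 * k + 1

-- ---- A side ----

theorem markFold_length (L : List Int) (s : List Bool) :
    (L.foldl (fun s j => PySem.List.pySetD s j true) s).length = s.length := by
  induction L generalizing s with
  | nil => rfl
  | cons a t ih => simp only [List.foldl]; rw [ih, PySem.List.length_pySetD]

theorem stepA_length (alley : List Int) (k : Int) (s : List Bool) (i : Int) :
    (stepA alley k s i).length = s.length := by
  simp only [stepA]
  split
  · rw [markFold_length]
  · rfl

theorem A_length (alley : List Int) (k : Int) :
    (make_shades alley k).length = alley.length := by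
  unfold make_shades
  generalize (PySem.List.pyRange 0 ((alley.length : Int) - 1) 1) = L
  generalize hs : (List.replicate alley.length false) = s
  have hlen : s.length = alley.length := by rw [← hs]; simp
  clear hs
  induction L generalizing s with
  | nil => exact hlen
  | cons a t ih =>
    simp only [List.foldl]
    exact ih _ (by rw [stepA_length]; exact hlen)

theorem markFold_getD (b : Int) : ∀ (m : Nat) (a : Int) (s : List Bool),
    0 ≤ a → b ≤ (s.length : Int) → (b - a).toNat = m → ∀ (j : Nat),
    ((PySem.List.pyRange a b 1).foldl (fun s j => PySem.List.pySetD s j true) s).getD j false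
      = (s.getD j false || decide (a ≤ (j : Int) ∧ (j : Int) < b)) := by
  intro m
  induction m with
  | zero =>
    intro a s ha hb hm j
    rw [PySem.List.pyRange_one_eq_nil (by omega)]
    simp only [List.foldl]
    have : ¬ (a ≤ (j : Int) ∧ (j : Int) < b) := by omega
    simp [this]
  | succ m ih =>
    intro a s ha hb hm j
    rw [PySem.List.pyRange_one_cons (by omega)]
    simp only [List.foldl]
    rw [PySem.List.pySetD_of_nonneg s true ha]
    rw [ih (a + 1) (s.set a.toNat true) (by omega) (by simpa using hb) (by omega) j]
    have hset : (s.set a.toNat true).getD j false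
        = (s.getD j false || decide ((j : Int) = a)) := by
      simp only [List.getD, List.getElem?_set]
      by_cases hja : a.toNat = j
      · have hjlt : a.toNat < s.length := by omega
        simp only [hja, if_pos (hja ▸ hjlt), show ((j : Int) = a) by omega,
          decide_true, Bool.or_true]
        rfl
      · have : ¬ ((j : Int) = a) := by omega
        simp [hja, this]
    rw [hset]
    have hassoc : ∀ p q r : Bool, (p || q || r) = (p || (q || r)) := by decide
    rw [hassoc]
    congr 1
    rw [show (decide ((j:Int) = a) || decide (a + 1 ≤ (j:Int) ∧ (j:Int) < b))
          = decide ((j:Int) = a ∨ (a + 1 ≤ (j:Int) ∧ (j:Int) < b)) by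
        by_cases h1 : (j:Int) = a <;> by_cases h2 : (a + 1 ≤ (j:Int) ∧ (j:Int) < b) <;>
          simp [h1, h2]]
    congr 1
    simp only [eq_iff_iff]
    omega

theorem A_getD (alley : List Int) (k : Int) :
    ∀ (m : Nat) (lo : Int) (s : List Bool), 0 ≤ lo →
    s.length = alley.length → (((alley.length : Int) - 1) - lo).toNat = m →
    ∀ (j : Nat), j < alley.length →
    (((PySem.List.pyRange lo ((alley.length : Int) - 1) 1).foldl
        (stepA alley k) s).getD j false = true
      ↔ (s.getD j false = true ∨ ∃ i : Nat, lo ≤ (i : Int) ∧ i ≤ j ∧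
          (i : Int) < (alley.length : Int) - 1 ∧
          PySem.List.pyGetD alley (i : Int) 0 ≠ 0 ∧
          (j : Int) < (i : Int) + PySem.List.pyGetD alley (i : Int) 0 * k + 1)) := by
  intro m
  induction m with
  | zero =>
    intro lo s hlo hs hm j hj
    rw [PySem.List.pyRange_one_eq_nil (by omega)]
    simp only [List.foldl]
    constructor
    · intro h; exact Or.inl h
    · rintro (h | ⟨i, h1, _, h3, _⟩)
      · exact h
      · omega
  | succ m ih =>
    intro lo s hlo hs hm j hj
    rw [PySem.List.pyRange_one_cons (by omega)]
    simp only [List.foldl]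
    rw [ih (lo + 1) (stepA alley k s lo) (by omega) (by rw [stepA_length]; exact hs)
        (by omega) j hj]
    set v := PySem.List.pyGetD alley lo 0 with hv
    by_cases hv0 : v = 0
    · have hstep : stepA alley k s lo = s := by
        simp only [stepA, ← hv, hv0]
        simp
      rw [hstep]
      constructor
      · rintro (h | ⟨i, h1, h2, h3, h4, h5⟩)
        · exact Or.inl h
        · exact Or.inr ⟨i, by omega, h2, h3, h4, h5⟩
      · rintro (h | ⟨i, h1, h2, h3, h4, h5⟩)
        · exact Or.inl h
        · by_cases hil : (i : Int) = lo
          · exfalso; rw [hil, ← hv] at h4; exact h4 hv0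
          · exact Or.inr ⟨i, by omega, h2, h3, h4, h5⟩
    · set sh_len := if lo + v * k + 1 < (alley.length : Int) then v * k + 1
                    else (alley.length : Int) - lo with hsh
      have hstep : stepA alley k s lo = (PySem.List.pyRange lo (lo + sh_len) 1).foldl
          (fun s j => PySem.List.pySetD s j true) s := by
        simp only [stepA, ← hv, hsh]
        simp [hv0]
      rw [hstep]
      have hb : lo + sh_len ≤ (s.length : Int) := by
        rw [hsh, hs]; split <;> omega
      rw [markFold_getD (lo + sh_len) (sh_len.toNat) lo s hlo hb (by omega) j]
      have horcases : (s.getD j false || decide (lo ≤ (j:Int) ∧ (j:Int) < lo + sh_len)) = true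
          ↔ (s.getD j false = true ∨ (lo ≤ (j:Int) ∧ (j:Int) < lo + sh_len)) := by
        cases h : s.getD j false <;> simp
      rw [horcases]
      constructor
      · rintro (⟨h | hcov⟩ | ⟨i, h1, h2, h3, h4, h5⟩)
        · exact Or.inl h
        · refine Or.inr ⟨lo.toNat, by omega, by omega, by omega, ?_, ?_⟩
          · rwa [show ((lo.toNat : Int)) = lo by omega, ← hv]
          · rw [show ((lo.toNat : Int)) = lo by omega, ← hv]
            rcases hcov with ⟨hc1, hc2⟩
            rw [hsh] at hc2
            split at hc2 <;> omega
        · exact Or.inr ⟨i, by omega, h2, h3, h4, h5⟩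
      · rintro (h | ⟨i, h1, h2, h3, h4, h5⟩)
        · exact Or.inl (Or.inl h)
        · by_cases hil : (i : Int) = lo
          · refine Or.inl (Or.inr ⟨by omega, ?_⟩)
            rw [hil, ← hv] at h5
            rw [hsh]
            split <;> omega
          · exact Or.inr ⟨i, by omega, h2, h3, h4, h5⟩

theorem A_char (alley : List Int) (k : Int) (j : Nat) (hj : j < alley.length) :
    ((make_shades alley k).getD j false = true) ↔ covP alley k j := by
  unfold make_shades covP
  rw [A_getD alley k (((alley.length : Int) - 1) - 0).toNat 0
      (List.replicate alley.length false) (by omega) (by simp) rfl j hj]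
  rw [show (List.replicate alley.length false).getD j false = false by simp]
  constructor
  · rintro (h | ⟨i, _, h2, h3, h4, h5⟩)
    · simp at h
    · exact ⟨i, h2, h3, h4, h5⟩
  · rintro ⟨i, h2, h3, h4, h5⟩
    exact Or.inr ⟨i, by omega, h2, h3, h4, h5⟩

-- ---- B side ----

-- the reach update of one sweep step (mirrors stepB on the .2 component)
def updR (n k r j v : Int) : Int :=
  if j < n - 1 ∧ v ≠ 0 then
    let e := j + v * k + 1
    let e := if e > n then n else e
    if e > r then e else r
  else r

def reachAfter (n k : Int) : List Int → Int → Int → Int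
  | [], _, r => r
  | v :: t, s, r => reachAfter n k t (s + 1) (updR n k r s v)

def outAux (n k : Int) : List Int → Int → Int → List Bool
  | [], _, _ => []
  | v :: t, s, r =>
    let r' := updR n k r s v
    decide (s < r') :: outAux n k t (s + 1) r'

theorem stepB_eq (n k : Int) (out : List Bool) (r j v : Int) :
    stepB n k (out, r) (j, v) = (out ++ [decide (j < updR n k r j v)], updR n k r j v) := rfl

theorem B_fold (n k : Int) :
    ∀ (l : List Int) (s : Int) (out0 : List Bool) (r0 : Int),
    ((PySem.List.enumerate l s).foldl (stepB n k) (out0, r0))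
      = (out0 ++ outAux n k l s r0, reachAfter n k l s r0) := by
  intro l
  induction l with
  | nil => intro s out0 r0; simp [PySem.List.enumerate_nil, outAux, reachAfter]
  | cons v t ih =>
    intro s out0 r0
    rw [PySem.List.enumerate_cons]
    simp only [List.foldl]
    rw [stepB_eq, ih]
    simp [outAux, reachAfter]

theorem outAux_length (n k : Int) (l : List Int) :
    ∀ (s r : Int), (outAux n k l s r).length = l.length := by
  induction l with
  | nil => intro s r; rfl
  | cons v t ih => intro s r; simp [outAux, ih]

theorem lt_updR (n k r j v x : Int) :
    x < updR n k r j v ↔ x < r ∨ (j < n - 1 ∧ v ≠ 0 ∧ x < j + v * k + 1 ∧ x < n) := by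
  unfold updR
  split
  · next h =>
    rcases h with ⟨h1, h2⟩
    simp only []
    constructor
    · intro hx
      split at hx <;> split at hx <;>
        first
          | (left; omega)
          | (right; exact ⟨h1, h2, by omega, by omega⟩)
    · rintro (hx | ⟨_, _, hx1, hx2⟩) <;> split <;> split <;> omega
  · next h =>
    constructor
    · intro hx; exact Or.inl hx
    · rintro (hx | ⟨h1, h2, _, _⟩)
      · exact hx
      · exact absurd ⟨h1, h2⟩ h

theorem lt_reachAfter (n k : Int) :
    ∀ (l : List Int) (s r x : Int),
    x < reachAfter n k l s r ↔ x < r ∨ ∃ t : Nat, t < l.length ∧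
      (s + t < n - 1 ∧ l.getD t 0 ≠ 0 ∧ x < s + t + l.getD t 0 * k + 1 ∧ x < n) := by
  intro l
  induction l with
  | nil =>
    intro s r x
    simp [reachAfter]
  | cons v tl ih =>
    intro s r x
    simp only [reachAfter]
    rw [ih, lt_updR]
    constructor
    · rintro ((hx | ⟨h1, h2, h3, h4⟩) | ⟨t, ht, h1, h2, h3, h4⟩)
      · exact Or.inl hx
      · exact Or.inr ⟨0, by simp, by simpa using h1, by simpa using h2,
          by push_cast; simpa using h3, h4⟩
      · refine Or.inr ⟨t + 1, by simpa using ht, ?_, ?_, ?_, h4⟩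
        · push_cast at h1 ⊢; omega
        · simpa using h2
        · push_cast at h3 ⊢
          have : (v :: tl).getD (t + 1) 0 = tl.getD t 0 := rfl
          rw [this]
          omega
    · rintro (hx | ⟨t, ht, h1, h2, h3, h4⟩)
      · exact Or.inl (Or.inl hx)
      · cases t with
        | zero =>
          refine Or.inl (Or.inr ⟨by simpa using h1, by simpa using h2,
            by push_cast at h3; simpa using h3, h4⟩)
        | succ t' =>
          refine Or.inr ⟨t', by simpa using ht, ?_, ?_, ?_, h4⟩
          · push_cast at h1 ⊢; omega
          · simpa using h2
          · have heq : (v :: tl).getD (t' + 1) 0 = tl.getD t' 0 := rfl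
            rw [heq] at h3
            push_cast at h3 ⊢
            omega

theorem outAux_getD (n k : Int) :
    ∀ (l : List Int) (s r : Int) (j : Nat), j < l.length →
    (outAux n k l s r).getD j false
      = decide ((s + (j : Int)) < reachAfter n k (l.take (j + 1)) s r) := by
  intro l
  induction l with
  | nil => intro s r j hj; simp at hj
  | cons v t ih =>
    intro s r j hj
    cases j with
    | zero => simp [outAux, reachAfter]
    | succ j' =>
      simp only [outAux, List.take_succ_cons, reachAfter]
      rw [List.getD_cons_succ, ih (s + 1) (updR n k r s v) j' (by simpa using hj)]
      congr 1
      push_cast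
      ring_nf

theorem B_char (alley : List Int) (k : Int) (j : Nat) (hj : j < alley.length) :
    ((make_shades_alt alley k).getD j false = true) ↔ covP alley k j := by
  simp only [make_shades_alt]
  rw [B_fold (alley.length : Int) k alley 0 [] 0]
  simp only [List.nil_append]
  rw [outAux_getD (alley.length : Int) k alley 0 0 j hj, decide_eq_true_iff,
    lt_reachAfter]
  unfold covP
  constructor
  · rintro (h | ⟨t, ht, h1, h2, h3, h4⟩)
    · omega
    · have htj : t ≤ j := by
        have : (alley.take (j + 1)).length ≤ j + 1 := by simp
        omega
      have hgetd : (alley.take (j + 1)).getD t 0 = alley.getD t 0 := by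
        rw [List.getD, List.getD, List.getElem?_take]
        simp only [show t < j + 1 by omega, if_pos]
      rw [hgetd] at h2 h3
      refine ⟨t, htj, by omega, ?_, ?_⟩
      · rwa [PySem.List.pyGetD_natCast]
      · rw [PySem.List.pyGetD_natCast]; omega
  · rintro ⟨i, h1, h2, h3, h4⟩
    rw [PySem.List.pyGetD_natCast] at h3 h4
    have hgetd : (alley.take (j + 1)).getD i 0 = alley.getD i 0 := by
      rw [List.getD, List.getD, List.getElem?_take]
      simp only [show i < j + 1 by omega, if_pos]
    refine Or.inr ⟨i, ?_, by omega, by rwa [hgetd], by rw [hgetd]; omega, by omega⟩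
    have : (alley.take (j + 1)).length = j + 1 := by
      rw [List.length_take]; omega
    omega

theorem B_length (alley : List Int) (k : Int) :
    (make_shades_alt alley k).length = alley.length := by
  simp only [make_shades_alt]
  rw [B_fold (alley.length : Int) k alley 0 [] 0]
  simp [outAux_length]

-- ===== VERDICT (by name: the statement is the Claim_ definition above) =====
theorem make_shades_spec : Claim_equal_make_shades := by
  intro alley k _
  unfold Spec_make_shades
  apply List.ext_getElem
  · rw [A_length, B_length]
  · intro j hjA hjB
    have hj : j < alley.length := by rwa [A_length] at hjA
    have hA : (make_shades alley k).getD j false = (make_shades alley k)[j] := by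
      rw [List.getD_eq_getElem?_getD, List.getElem?_eq_getElem hjA]; rfl
    have hB : (make_shades_alt alley k).getD j false = (make_shades_alt alley k)[j] := by
      rw [List.getD_eq_getElem?_getD, List.getElem?_eq_getElem hjB]; rfl
    rw [← hA, ← hB]
    have := (A_char alley k j hj).trans (B_char alley k j hj).symm
    cases h1 : (make_shades alley k).getD j false <;>
      cases h2 : (make_shades_alt alley k).getD j false <;>
        simp_all
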